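-- pv_equiv track=rewrite | github.com/wgrzesik/artificial_intelligence_forklif | algorytm_genetyczny.py | ocena_osobnika
-- ===== SOURCE A (Python) =====
-- def ocena_osobnika(osobnik):
--     ocena = 0
--
--     # Czy koordynaty sie nie powtarzaja
--     if len(osobnik) == len(set(osobnik)):
--         ocena += 10
--     else:
--         ocena -= 10
--
--     # Czy zachowany jest minimalny dystans miedzy koordynatami
--     for i in range(len(osobnik)):
--         for j in range(i + 1, len(osobnik)):
--             x1, y1 = osobnik[i]
--             x2, y2 = osobnik[j]
--             distance = max(abs(x2 - x1), abs(y2 - y1))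
--             if distance >= 3:
--                 ocena += 10
--             else:
--                 ocena -= 10
--
--     return ocena
-- ===== SOURCE B (Python) =====
-- def ocena_osobnika(osobnik):
--     # One head-vs-tail sweep counting only the CLOSE pairs (Chebyshev distance < 3),
--     # then a closed-form total: each of the C(n,2) pairs scores +10, a close pair 20 less.
--     close = 0
--     rest = osobnik
--     while rest:
--         (x1, y1), rest = rest[0], rest[1:]
--         close += sum(1 for (x2, y2) in rest if abs(x2 - x1) < 3 and abs(y2 - y1) < 3)
--     n = len(osobnik)
--     dup = 10 if n == len(set(osobnik)) else -10
--     return dup + 10 * (n * (n - 1) // 2) - 20 * close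
-- ===== Notes on version B (the rewrite author's own statement) =====
-- stated objective: alternative
-- what changed: Replaces the per-pair +-10 nested index loops by a single head-vs-tail sweep that counts only the close pairs (Chebyshev distance < 3) and a closed-form total dup + 10*C(n,2) - 20*close.
import Mathlib
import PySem

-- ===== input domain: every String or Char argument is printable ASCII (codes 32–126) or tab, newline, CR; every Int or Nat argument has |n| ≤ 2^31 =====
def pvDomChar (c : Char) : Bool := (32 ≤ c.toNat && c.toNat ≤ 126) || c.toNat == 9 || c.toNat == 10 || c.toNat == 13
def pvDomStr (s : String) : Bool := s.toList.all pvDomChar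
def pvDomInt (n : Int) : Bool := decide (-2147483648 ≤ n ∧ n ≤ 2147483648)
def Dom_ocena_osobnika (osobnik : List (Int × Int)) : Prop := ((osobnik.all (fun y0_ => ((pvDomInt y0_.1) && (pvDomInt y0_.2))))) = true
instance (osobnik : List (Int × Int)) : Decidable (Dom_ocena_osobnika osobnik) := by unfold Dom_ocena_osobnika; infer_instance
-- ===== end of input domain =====

-- B replaces A's per-pair ±10 nested index loops by one head-vs-tail sweep counting only the
-- close pairs (Chebyshev distance < 3) plus the closed-form total dup + 10*C(n,2) - 20*close.

-- ===== PORT A =====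
def ocena_osobnika (osobnik : List (Int × Int)) : Int :=
  let ocena : Int := if (osobnik.length : Int) = ((PySem.Set.ofList osobnik).length : Int) then 0 + 10 else 0 - 10
  (PySem.List.pyRange 0 (osobnik.length : Int) 1).foldl (fun oc i =>
    (PySem.List.pyRange (i + 1) (osobnik.length : Int) 1).foldl (fun oc2 j =>
      let p1 := PySem.List.pyGetD osobnik i (0, 0)
      let p2 := PySem.List.pyGetD osobnik j (0, 0)
      let distance := max |p2.1 - p1.1| |p2.2 - p1.2|
      if distance ≥ 3 then oc2 + 10 else oc2 - 10) oc) ocena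

-- ===== PORT B =====
-- the inner test of B's sweep: abs(x2 - x1) < 3 and abs(y2 - y1) < 3
def pvClose (p q : Int × Int) : Bool := |q.1 - p.1| < 3 && |q.2 - p.2| < 3

-- B's while-loop: take the head, count close partners in the tail, continue on the tail
def pvCloseCount (osobnik : List (Int × Int)) : Int :=
  match osobnik with
  | [] => 0
  | p :: rest => (rest.countP (pvClose p) : Int) + pvCloseCount rest

def ocena_osobnika_alt (osobnik : List (Int × Int)) : Int :=
  let close : Int := pvCloseCount osobnik
  let n : Int := osobnik.length
  let dup : Int := if n = ((PySem.Set.ofList osobnik).length : Int) then 10 else -10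
  dup + 10 * PySem.Int.floordiv (n * (n - 1)) 2 - 20 * close

-- ===== PRECONDITION & SPEC =====
def Spec_ocena_osobnika (osobnik : List (Int × Int)) (out : Int) : Prop := out = ocena_osobnika_alt osobnik
instance (osobnik : List (Int × Int)) (out : Int) : Decidable (Spec_ocena_osobnika osobnik out) := by unfold Spec_ocena_osobnika; infer_instance

-- ===== CLAIM (what is proved, stated in full; the proofs are below) =====
def Claim_equal_ocena_osobnika : Prop := ∀ (osobnik : List (Int × Int)), Dom_ocena_osobnika osobnik → Spec_ocena_osobnika osobnik (ocena_osobnika osobnik)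

-- ===== LEMMAS AND PROOFS =====

-- A's per-pair score
def pvPM (p q : Int × Int) : Int := if max |q.1 - p.1| |q.2 - p.2| ≥ 3 then 10 else -10

-- the sum of row k of A's pair loop
def pvRowSum (xs : List (Int × Int)) (k : Nat) : Int :=
  ((xs.drop (k + 1)).map (pvPM (xs.getD k (0, 0)))).sum

lemma pvPM_eq (p q : Int × Int) : pvPM p q = if pvClose p q then -10 else 10 := by
  simp only [pvPM, pvClose, ge_iff_le, ← not_lt, max_lt_iff, Bool.and_eq_true, decide_eq_true_eq]
  by_cases h1 : |q.1 - p.1| < 3 <;> by_cases h2 : |q.2 - p.2| < 3 <;> simp [h1, h2]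

lemma sum_pvPM (p : Int × Int) (l : List (Int × Int)) :
    (l.map (pvPM p)).sum = 10 * l.length - 20 * (l.countP (pvClose p) : Int) := by
  induction l with
  | nil => simp
  | cons x t ih =>
    simp only [List.map_cons, List.sum_cons, List.countP_cons, ih, pvPM_eq, List.length_cons]
    by_cases h : pvClose p x <;> simp [h] <;> ring

lemma rowSums_sum (xs : List (Int × Int)) :
    ((List.range xs.length).map (pvRowSum xs)).sum
      = 10 * ((xs.length * (xs.length - 1) / 2 : Nat) : Int) - 20 * pvCloseCount xs := by
  induction xs with
  | nil => simp [pvCloseCount]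
  | cons p rest ih =>
    have hsh : ∀ k, pvRowSum (p :: rest) (k + 1) = pvRowSum rest k := by
      intro k; simp [pvRowSum]
    have hmap : (List.range rest.length).map (fun k => pvRowSum (p :: rest) (k + 1))
        = (List.range rest.length).map (pvRowSum rest) :=
      List.map_congr_left (fun k _ => hsh k)
    have h0 : pvRowSum (p :: rest) 0 = (rest.map (pvPM p)).sum := by simp [pvRowSum]
    rw [List.length_cons, List.range_succ_eq_map, List.map_cons, List.map_map, List.sum_cons]
    have : (List.range rest.length).map (pvRowSum (p :: rest) ∘ (fun k => k + 1))
        = (List.range rest.length).map (pvRowSum rest) := by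
      simpa [Function.comp] using hmap
    rw [this, h0, ih, sum_pvPM]
    show _ = 10 * (((rest.length + 1) * (rest.length + 1 - 1) / 2 : Nat) : Int)
            - 20 * ((rest.countP (pvClose p) : Int) + pvCloseCount rest)
    have harith : ((rest.length + 1) * (rest.length + 1 - 1) / 2 : Nat)
        = rest.length + rest.length * (rest.length - 1) / 2 := by
      rcases rest.length with _ | m
      · rfl
      · have : (m + 1 + 1) * (m + 1) = (m + 1) * m + 2 * (m + 1) := by ring
        rw [Nat.add_sub_cancel, Nat.add_sub_cancel, this, Nat.add_mul_div_left _ _ (by norm_num : 0 < 2)]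
        omega
    rw [harith]; push_cast; ring

lemma floordiv_choose2 (m : Nat) :
    PySem.Int.floordiv ((m : Int) * ((m : Int) - 1)) 2 = ((m * (m - 1) / 2 : Nat) : Int) := by
  cases m with
  | zero => decide
  | succ k =>
    have h : ((k + 1 : Nat) : Int) * (((k + 1 : Nat) : Int) - 1) = (((k + 1) * k : Nat) : Int) := by
      push_cast; ring
    rw [h]
    exact PySem.Int.floordiv_natCast ((k + 1) * k) 2

lemma A_eq (xs : List (Int × Int)) :
    ocena_osobnika xs
      = (if (xs.length : Int) = ((PySem.Set.ofList xs).length : Int) then (10 : Int) else -10)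
        + ((List.range xs.length).map (pvRowSum xs)).sum := by
  unfold ocena_osobnika
  have hbody : ∀ (oc : Int), ∀ i ∈ PySem.List.pyRange 0 (xs.length : Int) 1,
      ((PySem.List.pyRange (i + 1) (xs.length : Int) 1).foldl (fun oc2 j =>
        let p1 := PySem.List.pyGetD xs i (0, 0)
        let p2 := PySem.List.pyGetD xs j (0, 0)
        let distance := max |p2.1 - p1.1| |p2.2 - p1.2|
        if distance ≥ 3 then oc2 + 10 else oc2 - 10) oc)
      = oc + ((xs.drop (i + 1).toNat).map (pvPM (PySem.List.pyGetD xs i (0, 0)))).sum := by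
    intro oc i hi
    have h0 : (0 : Int) ≤ i + 1 := by
      have := (PySem.List.mem_pyRange_one.mp hi).1; omega
    have hfold := PySem.List.foldl_pyRange_pyGetD' xs (0, 0)
      (fun oc2 q => oc2 + pvPM (PySem.List.pyGetD xs i (0, 0)) q) oc h0
    have hfun : (fun oc2 j =>
        let p1 := PySem.List.pyGetD xs i (0, 0)
        let p2 := PySem.List.pyGetD xs j (0, 0)
        let distance := max |p2.1 - p1.1| |p2.2 - p1.2|
        if distance ≥ 3 then oc2 + 10 else oc2 - 10)
        = (fun (oc2 : Int) (j : Int) => oc2 + pvPM (PySem.List.pyGetD xs i (0, 0)) (PySem.List.pyGetD xs j (0, 0))) := by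
      funext oc2 j
      simp only [pvPM]
      split_ifs <;> ring
    rw [hfun, hfold, PySem.List.foldl_add]
  rw [PySem.List.foldl_congr_mem _ _ _ _ hbody, PySem.List.foldl_add]
  congr 1
  rw [PySem.List.pyRange_zero_nat, List.map_map]
  refine congrArg List.sum (List.map_congr_left (fun k _ => ?_))
  simp only [Function.comp, pvRowSum]
  have h1 : ((k : Int) + 1).toNat = k + 1 := by omega
  rw [h1, PySem.List.pyGetD_natCast]

-- ===== VERDICT (by name: the statement is the Claim_ definition above) =====
theorem ocena_osobnika_spec : Claim_equal_ocena_osobnika := by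
  intro xs _
  unfold Spec_ocena_osobnika
  simp only [ocena_osobnika_alt]
  rw [A_eq, rowSums_sum, floordiv_choose2]
  ring
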